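-- pv_equiv track=rewrite | github.com/masteroleg/gm | scripts/index_docs.py | group_by_dir
-- ===== SOURCE A (Python) =====
-- from collections import defaultdict
--
-- def group_by_dir(items):
--     groups = defaultdict(list)
--     for rel, _ in items:
--         parts = rel.split("/")
--         if len(parts) > 1:
--             dir_name = parts[0]
--         else:
--             dir_name = "."
--         groups[dir_name].append(rel)
--     # sort within groups
--     for k in groups:
--         groups[k].sort()
--     return dict(groups)
-- ===== SOURCE B (Python) =====
-- def group_by_dir(items):
--     def dir_of(rel):
--         parts = rel.split("/")
--         return parts[0] if len(parts) > 1 else "."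
--     # register every group key once, in first-occurrence order
--     groups = {dir_of(rel): [] for rel, _ in items}
--     # one global sort; distributing the pre-sorted rels leaves every bucket sorted
--     for rel in sorted(rel for rel, _ in items):
--         groups[dir_of(rel)].append(rel)
--     return groups
-- ===== Notes on version B (the rewrite author's own statement) =====
-- stated objective: alternative
-- what changed: A appends rels into per-directory buckets and then sorts each bucket; B registers the buckets (first-occurrence key order), sorts the rel list once globally, and distributes the pre-sorted rels, so no per-group sort remains.
import Mathlib
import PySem

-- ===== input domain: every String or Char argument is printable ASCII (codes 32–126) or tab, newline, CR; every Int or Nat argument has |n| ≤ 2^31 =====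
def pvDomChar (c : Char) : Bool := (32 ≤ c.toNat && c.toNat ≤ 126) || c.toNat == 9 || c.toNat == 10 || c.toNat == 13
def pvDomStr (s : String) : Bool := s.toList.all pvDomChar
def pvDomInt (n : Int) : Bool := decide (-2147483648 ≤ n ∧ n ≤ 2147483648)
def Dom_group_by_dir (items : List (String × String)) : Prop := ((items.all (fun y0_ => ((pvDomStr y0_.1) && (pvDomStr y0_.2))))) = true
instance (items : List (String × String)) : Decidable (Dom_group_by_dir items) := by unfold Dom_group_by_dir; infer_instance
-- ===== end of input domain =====

-- B replaces A's per-group sorts by one global sort whose elements are distributed over pre-registered buckets (objective: alternative).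

-- shared subexpression of both Pythons: rel.split("/")[0] if the split has >1 parts, else "."
-- (split? is none only for sep = "", which "/" is not; the getD [] is unreachable)
def dirOf (rel : String) : String :=
  let parts := (PySem.Str.split? rel "/").getD []
  if parts.length > 1 then parts.headD "." else "."

-- ===== PORT A =====
def group_by_dir (items : List (String × String)) : List (String × List String) :=
  let groups := items.foldl (fun g p => g.modify (dirOf p.1) [] (fun v => v ++ [p.1]))
    (PySem.Dict.empty : PySem.Dict String (List String))
  (groups.items).map (fun kv => (kv.1, PySem.List.sorted kv.2 (fun x => x) false))

-- ===== PORT B =====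
def group_by_dir_alt (items : List (String × String)) : List (String × List String) :=
  let reg := items.foldl (fun g p => g.insert (dirOf p.1) [])
    (PySem.Dict.empty : PySem.Dict String (List String))
  let rels := PySem.List.sorted (items.map (fun p => p.1)) (fun x => x) false
  let groups := rels.foldl (fun g r => g.modify (dirOf r) [] (fun v => v ++ [r])) reg
  groups.items

-- ===== PRECONDITION & SPEC =====
def Spec_group_by_dir (items : List (String × String)) (out : List (String × List String)) : Prop := out = group_by_dir_alt items
instance (items : List (String × String)) (out : List (String × List String)) : Decidable (Spec_group_by_dir items out) := by unfold Spec_group_by_dir; infer_instance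

-- ===== CLAIM (what is proved, stated in full; the proofs are below) =====
def Claim_equal_group_by_dir : Prop := ∀ (items : List (String × String)), Dom_group_by_dir items → Spec_group_by_dir items (group_by_dir items)

-- ===== LEMMAS AND PROOFS =====

-- abbreviations for the two folds (proof-local)
def dictA (items : List (String × String)) : PySem.Dict String (List String) :=
  items.foldl (fun g p => g.modify (dirOf p.1) [] (fun v => v ++ [p.1]))
    (PySem.Dict.empty : PySem.Dict String (List String))

def dictReg (items : List (String × String)) : PySem.Dict String (List String) :=
  items.foldl (fun g p => g.insert (dirOf p.1) [])
    (PySem.Dict.empty : PySem.Dict String (List String))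

def dictB (items : List (String × String)) : PySem.Dict String (List String) :=
  (PySem.List.sorted (items.map (fun p => p.1)) (fun x => x) false).foldl
    (fun g r => g.modify (dirOf r) [] (fun v => v ++ [r])) (dictReg items)

-- the key-registration dict maps every key to []
lemma getD_reg_aux (items : List (String × String)) (d : PySem.Dict String (List String))
    (h : ∀ c, d.getD c ([] : List String) = []) (c : String) :
    (items.foldl (fun g p => g.insert (dirOf p.1) []) d).getD c ([] : List String) = [] := by
  induction items generalizing d with
  | nil => exact h c
  | cons p t ih =>
      refine ih _ (fun c' => ?_)
      rw [PySem.Dict.getD_insert]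
      split <;> simp [h]

lemma getD_reg (items : List (String × String)) (c : String) :
    (dictReg items).getD c ([] : List String) = [] :=
  getD_reg_aux items _ (fun c' => PySem.Dict.getD_empty c' []) c

-- sorting then filtering equals filtering then sorting (strings, identity key)
lemma sorted_filter_comm (q : String → Bool) (l : List String) :
    PySem.List.sorted (l.filter q) (fun x => x) false
      = (PySem.List.sorted l (fun x => x) false).filter q :=
  PySem.List.sorted_id_eq_of_perm_of_pairwise _ _
    ((PySem.List.sorted_perm l (fun x => x) false).filter q)
    ((PySem.List.sorted_pairwise l (fun x => x)).filter q)

-- A's dict's value at c: the rels keyed c, in input order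
lemma getD_dictA (items : List (String × String)) (c : String) :
    (dictA items).getD c []
      = (items.map (fun p => p.1)).filter (fun r => dirOf r == c) := by
  have h := PySem.Dict.getD_foldl_modify_append
      (l := items.map (fun p => (dirOf p.1, p.1)))
      (d := (PySem.Dict.empty : PySem.Dict String (List String))) (c := c)
  rw [List.foldl_map] at h
  unfold dictA
  rw [h]
  simp [List.filter_map, Function.comp_def]

-- B's dict's value at c: the rels keyed c, drawn from the sorted rels
lemma getD_dictB (items : List (String × String)) (c : String) :
    (dictB items).getD c []
      = (PySem.List.sorted (items.map (fun p => p.1)) (fun x => x) false).filter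
          (fun r => dirOf r == c) := by
  have h := PySem.Dict.getD_foldl_modify_append
      (l := (PySem.List.sorted (items.map (fun p => p.1)) (fun x => x) false).map
              (fun r => (dirOf r, r)))
      (d := dictReg items) (c := c)
  rw [List.foldl_map] at h
  unfold dictB
  rw [h, getD_reg]
  simp [List.filter_map, Function.comp_def]

-- both dicts carry the same key list, nodup
lemma keys_dictA (items : List (String × String)) :
    (dictA items).keys = PySem.Set.ofList (items.map (fun p => dirOf p.1)) := by
  unfold dictA
  rw [PySem.Dict.keys_foldl_modify_key items (fun p => dirOf p.1) [] (fun _ p => (fun v => v ++ [p.1]))]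
  simp [PySem.Set.update_nil_left]

lemma keys_dictReg (items : List (String × String)) :
    (dictReg items).keys = PySem.Set.ofList (items.map (fun p => dirOf p.1)) := by
  unfold dictReg
  rw [PySem.Dict.keys_foldl_insert_key items (fun p => dirOf p.1) (fun _ _ => [])]
  simp [PySem.Set.update_nil_left]

lemma keys_dictB (items : List (String × String)) :
    (dictB items).keys = (dictReg items).keys := by
  unfold dictB
  rw [PySem.Dict.keys_foldl_modify_key _ (fun r => dirOf r) [] (fun _ r => (fun v => v ++ [r]))]
  rw [PySem.Set.update_eq_append_filter, keys_dictReg]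
  have : ∀ y ∈ PySem.Set.ofList ((PySem.List.sorted (items.map (fun p => p.1)) (fun x => x) false).map (fun r => dirOf r)),
      (PySem.Set.ofList (items.map (fun p => dirOf p.1))).contains y = true := by
    intro y hy
    rw [PySem.Set.mem_ofList] at hy
    rcases List.mem_map.mp hy with ⟨r, hr, rfl⟩
    rw [PySem.Set.contains_iff, PySem.Set.mem_ofList]
    rcases List.mem_map.mp ((PySem.List.mem_sorted _ _ _ r).mp hr) with ⟨p, hp, rfl⟩
    exact List.mem_map.mpr ⟨p, hp, rfl⟩
  rw [List.filter_eq_nil_iff.mpr (by intro y hy; simp only [this y hy, Bool.not_true]; simp), List.append_nil]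

lemma nodup_keys_dictA (items : List (String × String)) : (dictA items).keys.Nodup := by
  rw [keys_dictA]; exact PySem.Set.nodup_ofList _

lemma nodup_keys_dictB (items : List (String × String)) : (dictB items).keys.Nodup := by
  rw [keys_dictB, keys_dictReg]; exact PySem.Set.nodup_ofList _

-- ===== VERDICT (by name: the statement is the Claim_ definition above) =====
theorem group_by_dir_spec : Claim_equal_group_by_dir := by
  intro items _
  show group_by_dir items = group_by_dir_alt items
  have hA : group_by_dir items
      = (dictA items).items.map (fun kv => (kv.1, PySem.List.sorted kv.2 (fun x => x) false)) := rfl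
  have hB : group_by_dir_alt items = (dictB items).items := rfl
  rw [hA, hB,
    PySem.Dict.items_eq_map_keys (dictA items) (nodup_keys_dictA items) [],
    PySem.Dict.items_eq_map_keys (dictB items) (nodup_keys_dictB items) [],
    keys_dictB, keys_dictReg, keys_dictA, List.map_map]
  refine List.map_congr_left (fun k _ => ?_)
  simp only [Function.comp_def, getD_dictA, getD_dictB, sorted_filter_comm]
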